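-- pv_equiv track=rewrite | github.com/TenmonAI/tenmon-ark | api/automation/tenmon_operations_level_autonomy_v1.py | pick_one_card
-- ===== SOURCE A (Python) =====
-- from typing import Any
--
-- def scope_index(order: list[str], s: str) -> int:
--     try:
--         return order.index(s)
--     except ValueError:
--         return 0
--
-- def pick_one_card(
--     candidates: list[dict[str, Any]],
--     allowed_max: str,
--     policy: dict[str, Any],
-- ) -> dict[str, Any] | None:
--     order = list(policy.get("scope_order") or ["safe", "medium", "high_risk"])
--     max_ix = scope_index(order, allowed_max)
--     filtered = [c for c in candidates if scope_index(order, c.get("declared_scope") or "medium") <= max_ix]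
--     filtered.sort(key=lambda c: scope_index(order, c.get("declared_scope") or "medium"))
--     if not filtered:
--         return None
--     return filtered[0]
-- ===== SOURCE B (Python) =====
-- from typing import Any
--
-- def pick_one_card(
--     candidates: list[dict[str, Any]],
--     allowed_max: str,
--     policy: dict[str, Any],
-- ) -> dict[str, Any] | None:
--     order = list(policy.get("scope_order") or ["safe", "medium", "high_risk"])
--     rank = {}
--     for i, s in enumerate(order):
--         rank.setdefault(s, i)
--     max_ix = rank.get(allowed_max, 0)
--     best = None
--     for c in candidates:
--         ix = rank.get(c.get("declared_scope") or "medium", 0)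
--         if ix <= max_ix and (best is None or ix < best[1]):
--             best = (c, ix)
--     return best[0] if best else None
-- ===== Notes on version B (the rewrite author's own statement) =====
-- stated objective: alternative
-- what changed: Replaces A's filter-then-stable-sort-then-head with a single pass that keeps the first candidate of minimal rank, using a scope-to-rank dict built once from the order list so the sort and the repeated list.index scans disappear.
import Mathlib
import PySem

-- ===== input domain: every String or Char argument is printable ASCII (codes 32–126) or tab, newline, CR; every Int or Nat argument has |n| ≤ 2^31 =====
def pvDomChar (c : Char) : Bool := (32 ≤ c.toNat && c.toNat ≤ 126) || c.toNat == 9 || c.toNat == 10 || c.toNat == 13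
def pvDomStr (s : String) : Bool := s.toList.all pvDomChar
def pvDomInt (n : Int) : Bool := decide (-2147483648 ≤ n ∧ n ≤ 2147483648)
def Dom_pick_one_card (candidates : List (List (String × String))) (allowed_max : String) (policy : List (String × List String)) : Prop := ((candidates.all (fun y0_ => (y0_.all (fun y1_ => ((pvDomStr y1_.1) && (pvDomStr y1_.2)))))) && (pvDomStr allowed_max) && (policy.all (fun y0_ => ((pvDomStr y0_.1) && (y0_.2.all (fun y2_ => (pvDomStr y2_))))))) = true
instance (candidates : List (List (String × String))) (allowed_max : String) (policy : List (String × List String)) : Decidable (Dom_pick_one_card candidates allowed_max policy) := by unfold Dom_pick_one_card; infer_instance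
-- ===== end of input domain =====

-- B replaces A's filter+stable-sort+head with a single pass keeping the first candidate of
-- minimal rank, using a scope→rank dict built once (no sort, no repeated list.index scans);
-- same value everywhere.

-- ===== PORT A =====
-- module helper: order.index(s) with ValueError -> 0
def scope_index (order : List String) (s : String) : Nat :=
  match PySem.List.index? order s with
  | some i => i
  | none => 0

-- c.get("declared_scope") or "medium"  (missing key or empty string are falsy)
def declared_scope (c : List (String × String)) : String :=
  match (PySem.Dict.mk c).get? "declared_scope" with
  | some s => if s = "" then "medium" else s
  | none => "medium"

-- list(policy.get("scope_order") or ["safe", "medium", "high_risk"])  (missing key or empty list are falsy)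
def scope_order (policy : List (String × List String)) : List String :=
  match (PySem.Dict.mk policy).get? "scope_order" with
  | some l => if l = [] then ["safe", "medium", "high_risk"] else l
  | none => ["safe", "medium", "high_risk"]

def pick_one_card (candidates : List (List (String × String))) (allowed_max : String) (policy : List (String × List String)) : Option (List (String × String)) :=
  let order := scope_order policy
  let max_ix := scope_index order allowed_max
  let filtered := candidates.filter (fun c => scope_index order (declared_scope c) ≤ max_ix)
  let sortedF := PySem.List.sorted filtered (fun c => scope_index order (declared_scope c))
  match sortedF with
  | [] => none
  | c :: _ => some c

-- ===== PORT B =====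
def pick_one_card_alt (candidates : List (List (String × String))) (allowed_max : String) (policy : List (String × List String)) : Option (List (String × String)) :=
  -- order = list(policy.get("scope_order") or ["safe", "medium", "high_risk"])
  let order : List String :=
    match (PySem.Dict.mk policy).get? "scope_order" with
    | some l => if l = [] then ["safe", "medium", "high_risk"] else l
    | none => ["safe", "medium", "high_risk"]
  -- rank = {}; for i, s in enumerate(order): rank.setdefault(s, i)
  let rank : PySem.Dict String Int :=
    (PySem.List.enumerate order).foldl (fun d p => d.setdefault p.2 p.1) PySem.Dict.empty
  -- max_ix = rank.get(allowed_max, 0)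
  let max_ix : Int := rank.getD allowed_max 0
  -- best = None; for c in candidates: ix = rank.get(c.get("declared_scope") or "medium", 0); …
  let best : Option ((List (String × String)) × Int) :=
    candidates.foldl
      (fun best c =>
        let ix : Int := rank.getD
          (match (PySem.Dict.mk c).get? "declared_scope" with
           | some s => if s = "" then "medium" else s
           | none => "medium") 0
        if decide (ix ≤ max_ix) && (match best with | none => true | some b => decide (ix < b.2))
        then some (c, ix) else best)
      none
  -- return best[0] if best else None
  best.map (fun b => b.1)

-- ===== PRECONDITION & SPEC =====
def Spec_pick_one_card (candidates : List (List (String × String))) (allowed_max : String) (policy : List (String × List String)) (out : Option (List (String × String))) : Prop := out = pick_one_card_alt candidates allowed_max policy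
instance (candidates : List (List (String × String))) (allowed_max : String) (policy : List (String × List String)) (out : Option (List (String × String))) : Decidable (Spec_pick_one_card candidates allowed_max policy out) := by unfold Spec_pick_one_card; infer_instance

-- ===== CLAIM (what is proved, stated in full; the proofs are below) =====
def Claim_equal_pick_one_card : Prop := ∀ (candidates : List (List (String × String))) (allowed_max : String) (policy : List (String × List String)), Dom_pick_one_card candidates allowed_max policy → Spec_pick_one_card candidates allowed_max policy (pick_one_card candidates allowed_max policy)

-- ===== LEMMAS AND PROOFS =====

-- 'first minimal element' step: keep the earlier element on key ties
def pvStep {α : Type} (k : α → Nat) (acc : Option α) (c : α) : Option α :=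
  match acc with
  | none => some c
  | some b => if k c < k b then some c else acc

def pvBest {α : Type} (k : α → Nat) (xs : List α) : Option α := xs.foldl (pvStep k) none

theorem pvBest_append {α : Type} (k : α → Nat) (xs : List α) (x : α) :
    pvBest k (xs ++ [x]) = pvStep k (pvBest k xs) x := by
  simp [pvBest, List.foldl_append]

-- head of the stable insertion sort = first minimal element
theorem head_sorted_eq_pvBest {α : Type} (k : α → Nat) (xs : List α) :
    (PySem.List.sorted xs k).head? = pvBest k xs := by
  induction xs using List.reverseRecOn with
  | nil => rfl
  | append_singleton xs x ih =>
    rw [PySem.List.sorted_eq_foldl_insertBy, List.foldl_append,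
        ← PySem.List.sorted_eq_foldl_insertBy, pvBest_append]
    cases h : PySem.List.sorted xs k with
    | nil =>
      have hxs : xs = [] := (PySem.List.sorted_eq_nil_iff xs k false).mp h
      subst hxs
      simp [PySem.List.insertBy, pvStep, pvBest]
    | cons h₀ t =>
      have hb : pvBest k xs = some h₀ := by rw [← ih, h]; rfl
      rw [hb]
      simp only [List.foldl_cons, List.foldl_nil, PySem.List.insertBy, pvStep]
      split_ifs <;> simp_all

-- pvBest over a filtered list, as a guarded fold over the original list
def pvBestLe {α : Type} (k : α → Nat) (m : Nat) (xs : List α) : Option α :=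
  xs.foldl (fun acc c => if k c ≤ m then pvStep k acc c else acc) none

theorem pvBest_filter {α : Type} (k : α → Nat) (m : Nat) (xs : List α) :
    pvBest k (xs.filter (fun c => k c ≤ m)) = pvBestLe k m xs := by
  simp [pvBest, pvBestLe, List.foldl_filter]

-- the scope→rank dict reproduces first-occurrence list index (shifted by the start offset)
theorem rank_fold_get? (l : List String) (n : Int) (d : PySem.Dict String Int) (s : String) :
    ((PySem.List.enumerate l n).foldl (fun d p => d.setdefault p.2 p.1) d).get? s
      = (d.get? s).or ((PySem.List.index? l s).map (fun i => n + i)) := by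
  induction l generalizing n d with
  | nil => simp [PySem.List.enumerate_nil, PySem.List.index?]
  | cons x xs ih =>
    rw [PySem.List.enumerate_cons]
    simp only [List.foldl_cons]
    rw [ih]
    by_cases hx : s = x
    · subst hx
      rw [PySem.Dict.get?_setdefault_self, PySem.List.index?_cons_self]
      cases hd : d.get? s with
      | none => simp
      | some v => simp
    · rw [PySem.Dict.get?_setdefault_of_ne _ _ hx,
          PySem.List.index?_cons_of_ne _ (Ne.symm hx)]
      cases hd : d.get? s with
      | none =>
        cases hi : PySem.List.index? xs s with
        | none => simp
        | some i => simp; ring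
      | some v => simp

theorem rank_getD (order : List String) (s : String) :
    ((PySem.List.enumerate order).foldl (fun d p => d.setdefault p.2 p.1)
        PySem.Dict.empty).getD s 0 = ((scope_index order s : Nat) : Int) := by
  rw [PySem.Dict.getD_eq_get?_getD, rank_fold_get? order 0 PySem.Dict.empty s,
      PySem.Dict.get?_empty]
  unfold scope_index
  cases h : PySem.List.index? order s <;> simp

-- 'best is None or ix < best[1]' as a helper shared by the proof statements
def pvLive {α : Type} (ix : Int) (best : Option (α × Int)) : Bool :=
  match best with
  | none => true
  | some b => decide (ix < b.2)

-- B's single pass (tracking (candidate, rank) with Int ranks) computes pvBestLe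
theorem foldB_eq {α : Type} (k : α → Nat) (m : Nat) (xs : List α) (g : Option α) :
    xs.foldl
      (fun best c =>
        if decide ((k c : Int) ≤ (m : Int)) && pvLive ((k c : Int)) best
        then some (c, (k c : Int)) else best)
      (g.map (fun b => (b, (k b : Int))))
    = (xs.foldl (fun acc c => if k c ≤ m then pvStep k acc c else acc) g).map
        (fun b => (b, (k b : Int))) := by
  induction xs generalizing g with
  | nil => rfl
  | cons c xs ih =>
    simp only [List.foldl_cons]
    have hstep :
        (if decide ((k c : Int) ≤ (m : Int)) && pvLive ((k c : Int)) (g.map (fun b => (b, (k b : Int))))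
         then some (c, (k c : Int)) else g.map (fun b => (b, (k b : Int))))
        = (if k c ≤ m then pvStep k g c else g).map (fun b => (b, (k b : Int))) := by
      cases g with
      | none =>
        by_cases h : k c ≤ m <;> simp [pvStep, pvLive, h]
      | some b =>
        by_cases h : k c ≤ m
        · by_cases hlt : k c < k b <;> simp [pvStep, pvLive, h, hlt]
        · simp [pvLive, h]
    rw [hstep, ih]

-- ===== VERDICT (by name: the statement is the Claim_ definition above) =====
theorem pick_one_card_spec : Claim_equal_pick_one_card := by
  intro candidates allowed_max policy _
  unfold Spec_pick_one_card pick_one_card pick_one_card_alt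
  simp only []
  set order := scope_order policy with horder
  have horder' :
      (match (PySem.Dict.mk policy).get? "scope_order" with
       | some l => if l = [] then ["safe", "medium", "high_risk"] else l
       | none => ["safe", "medium", "high_risk"]) = order := by
    rw [horder]; rfl
  rw [horder']
  set k : (List (String × String)) → Nat := fun c => scope_index order (declared_scope c) with hk
  set m := scope_index order allowed_max with hm
  -- rewrite B's rank lookups into scope_index
  have hmax :
      ((PySem.List.enumerate order).foldl (fun d p => d.setdefault p.2 p.1)
        PySem.Dict.empty).getD allowed_max 0 = ((m : Nat) : Int) := rank_getD order allowed_max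
  have hfun :
      (fun (best : Option ((List (String × String)) × Int)) (c : List (String × String)) =>
        if (decide (((PySem.List.enumerate order).foldl (fun d p => d.setdefault p.2 p.1)
              PySem.Dict.empty).getD
              (match (PySem.Dict.mk c).get? "declared_scope" with
               | some s => if s = "" then "medium" else s
               | none => "medium") 0
            ≤ ((PySem.List.enumerate order).foldl (fun d p => d.setdefault p.2 p.1)
              PySem.Dict.empty).getD allowed_max 0) &&
            match best with
            | none => true
            | some b => decide (((PySem.List.enumerate order).foldl (fun d p => d.setdefault p.2 p.1)
                PySem.Dict.empty).getD
                (match (PySem.Dict.mk c).get? "declared_scope" with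
                 | some s => if s = "" then "medium" else s
                 | none => "medium") 0 < b.2)) = true
        then some (c, ((PySem.List.enumerate order).foldl (fun d p => d.setdefault p.2 p.1)
              PySem.Dict.empty).getD
              (match (PySem.Dict.mk c).get? "declared_scope" with
               | some s => if s = "" then "medium" else s
               | none => "medium") 0)
        else best)
      = (fun best c =>
          if decide ((k c : Int) ≤ (m : Int)) && pvLive ((k c : Int)) best
          then some (c, (k c : Int)) else best) := by
    funext best c
    have hdecl :
        (match (PySem.Dict.mk c).get? "declared_scope" with
         | some s => if s = "" then "medium" else s
         | none => "medium") = declared_scope c := rfl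
    simp only [hdecl, rank_getD, hmax, hk]
    cases best <;> rfl
  rw [hfun]
  have hB := foldB_eq k m candidates none
  simp only [Option.map_none] at hB
  rw [hB]
  have hA := head_sorted_eq_pvBest k
    (candidates.filter (fun c => k c ≤ m))
  rw [pvBest_filter] at hA
  have : (match PySem.List.sorted (candidates.filter (fun c => decide (k c ≤ m))) k with
          | [] => none
          | c :: _ => some c)
        = (PySem.List.sorted (candidates.filter (fun c => decide (k c ≤ m))) k).head? := by
    cases PySem.List.sorted (candidates.filter (fun c => decide (k c ≤ m))) k <;> rfl
  rw [this, hA]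
  unfold pvBestLe
  cases candidates.foldl (fun acc c => if k c ≤ m then pvStep k acc c else acc) none <;> rfl
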